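-- pv_equiv track=rewrite | github.com/AtoBrightSide/contests | pastContests/C_Death_s_Blessing.py | solution
-- ===== SOURCE A (Python) =====
-- def solution(h, s, n):
--     m = []
--     for i in range(n):
--         m.append([h[i], s[i], i])
--
--     new_m = sorted(m, key=lambda x: x[1])
--
--     time = sum(h)
--     for hlth, strgth, idx in new_m:
--         m[idx][0] = -1
--         if idx > 0:
--             curr = idx - 1
--             while curr >= 0 and m[curr][0] == -1:
--                 curr -= 1
--             if curr >= 0:
--                 time += strgth
--         if idx < len(m) - 1:
--             curr = idx + 1
--             while curr < len(m) and m[curr][0] == -1: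
--                 curr += 1
--             if curr < len(m):
--                 time += strgth
--
--     return time
-- ===== SOURCE B (Python) =====
-- def solution(h, s, n):
--     # O(n): monster i's strength is paid once per side on which some monster
--     # outlives it: left neighbors with strictly larger strength, right
--     # neighbors with larger-or-equal strength (kills happen in stable
--     # increasing-strength order, ties killed left-to-right).
--     total = sum(h)
--     best = None  # max strength among s[0..i-1]
--     for i in range(n):
--         if best is not None and best > s[i]:
--             total += s[i]
--         if best is None or s[i] > best:
--             best = s[i]
--     best = None  # max strength among s[i+1..n-1]
--     for i in range(n - 1, -1, -1):
--         if best is not None and best >= s[i]: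
--             total += s[i]
--         if best is None or s[i] > best:
--             best = s[i]
--     return total
-- ===== Notes on version B (the rewrite author's own statement) =====
-- stated objective: faster
-- what changed: A simulates the kills in sorted strength order, mutating an array and linearly scanning for the nearest alive neighbor at each kill (O(n^2)); B computes the same total with two O(n) running-maximum passes, adding s[i] once if a strictly stronger monster exists to the left and once if an at-least-as-strong one exists to the right.
-- outside the precondition, e.g. on solution([-1, 1], [2, 1], 2): A returns 0, B returns 1
import Mathlib
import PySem

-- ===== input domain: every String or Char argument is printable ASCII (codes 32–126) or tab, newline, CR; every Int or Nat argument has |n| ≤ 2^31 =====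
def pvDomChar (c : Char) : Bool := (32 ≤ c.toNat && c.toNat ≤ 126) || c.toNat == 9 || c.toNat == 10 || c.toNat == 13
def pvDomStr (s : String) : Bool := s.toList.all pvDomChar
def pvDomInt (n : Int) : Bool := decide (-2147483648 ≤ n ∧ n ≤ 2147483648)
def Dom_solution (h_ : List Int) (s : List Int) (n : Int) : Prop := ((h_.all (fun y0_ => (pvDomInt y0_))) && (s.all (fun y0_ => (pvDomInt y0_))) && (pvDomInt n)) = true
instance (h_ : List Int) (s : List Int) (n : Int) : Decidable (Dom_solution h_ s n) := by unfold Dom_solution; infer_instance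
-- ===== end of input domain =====

-- B replaces A's O(n^2) kill-order simulation by two O(n) running-maximum scans:
-- monster i's strength is paid once per side on which some monster outlives it
-- (strictly stronger on the left, at-least-as-strong on the right).

-- ===== PORT A =====
def scanL (m : List (Int × Int × Int)) (curr : Int) : Int :=
  if 0 ≤ curr ∧ (PySem.List.pyGetD m curr (0, 0, 0)).1 = -1 then scanL m (curr - 1) else curr
termination_by (curr + 1).toNat
decreasing_by omega

def scanR (m : List (Int × Int × Int)) (curr : Int) : Int :=
  if curr < (m.length : Int) ∧ (PySem.List.pyGetD m curr (0, 0, 0)).1 = -1 then scanR m (curr + 1) else curr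
termination_by ((m.length : Int) - curr).toNat
decreasing_by omega

-- body of A's for-loop over new_m (state: the mutated list m and the running time);
-- m[curr] is read with pyGetD: under Pre_ every index the loop reaches is in range,
-- so the default is never the value Python would raise on
def stepA (st : List (Int × Int × Int) × Int) (t : Int × Int × Int) : List (Int × Int × Int) × Int :=
  let m := st.1.set t.2.2.toNat (-1, t.2.1, t.2.2)
  let time := st.2
  let time := if 0 < t.2.2 then
      (if 0 ≤ scanL m (t.2.2 - 1) then time + t.2.1 else time)
    else time
  let time := if t.2.2 < (m.length : Int) - 1 then
      (if scanR m (t.2.2 + 1) < (m.length : Int) then time + t.2.1 else time)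
    else time
  (m, time)

def solution (h_ : List Int) (s : List Int) (n : Int) : Int :=
  let m := (PySem.List.pyRange 0 n 1).foldl
    (fun acc i => acc ++ [(PySem.List.pyGetD h_ i 0, PySem.List.pyGetD s i 0, i)]) []
  let new_m := PySem.List.sorted m (fun x => x.2.1) false
  let st := new_m.foldl stepA (m, h_.sum)
  st.2

-- ===== PORT B =====
def solution_alt (h_ : List Int) (s : List Int) (n : Int) : Int :=
  let total := h_.sum
  let st := (PySem.List.pyRange 0 n 1).foldl
    (fun (st : Int × Option Int) i =>
      let si := PySem.List.pyGetD s i 0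
      let total := match st.2 with
        | some b => if b > si then st.1 + si else st.1
        | none => st.1
      let best := match st.2 with
        | none => some si
        | some b => if si > b then some si else some b
      (total, best))
    (total, none)
  let st2 := (PySem.List.pyRange (n - 1) (-1) (-1)).foldl
    (fun (st : Int × Option Int) i =>
      let si := PySem.List.pyGetD s i 0
      let total := match st.2 with
        | some b => if b ≥ si then st.1 + si else st.1
        | none => st.1
      let best := match st.2 with
        | none => some si
        | some b => if si > b then some si else some b
      (total, best))
    (st.1, none)
  st2.1

-- ===== PRECONDITION & SPEC =====
-- Pre_ requires n within both lengths (A raises IndexError otherwise) and excludes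
-- inputs where one of the first n healths equals -1: healths are positive in this
-- task's natural domain, and -1 collides with A's in-band 'dead' marker, so A may
-- treat a live monster as dead there.
def Pre_solution (h_ : List Int) (s : List Int) (n : Int) : Prop :=
  n ≤ (h_.length : Int) ∧ n ≤ (s.length : Int) ∧ ∀ k < n.toNat, h_.getD k 0 ≠ -1
instance (h_ : List Int) (s : List Int) (n : Int) : Decidable (Pre_solution h_ s n) := by
  unfold Pre_solution; infer_instance

def pvWitness_solution : List Int × List Int × Int := ([2, 3, 1], [1, 2, 1], 3)

def Spec_solution (h_ : List Int) (s : List Int) (n : Int) (out : Int) : Prop := out = solution_alt h_ s n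
instance (h_ : List Int) (s : List Int) (n : Int) (out : Int) : Decidable (Spec_solution h_ s n out) := by unfold Spec_solution; infer_instance

-- ===== CLAIM (what is proved, stated in full; the proofs are below) =====
def Claim_equal_solution : Prop := ∀ (h_ : List Int) (s : List Int) (n : Int), Dom_solution h_ s n → Pre_solution h_ s n → Spec_solution h_ s n (solution h_ s n)

-- ===== LEMMAS AND PROOFS =====
def SV (s : List Int) (k : Nat) : Int := s.getD k 0

def HV (h : List Int) (k : Nat) : Int := h.getD k 0

def FT (h s : List Int) (k : Nat) : Int × Int × Int := (HV h k, SV s k, (k : Int))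

def LexLt (a b : Int × Int × Int) : Prop := a.2.1 < b.2.1 ∨ (a.2.1 = b.2.1 ∧ a.2.2 < b.2.2)

def mstL (h s : List Int) (N : Nat) (P : Nat → Bool) : List (Int × Int × Int) :=
  (List.range N).map (fun k => (if P k then -1 else HV h k, SV s k, (k : Int)))

theorem length_mstL (h s : List Int) (N : Nat) (P : Nat → Bool) : (mstL h s N P).length = N := by
  simp [mstL]

theorem getElem_mstL (h s : List Int) (N : Nat) (P : Nat → Bool) (k : Nat) (hk : k < N) :
    (mstL h s N P)[k]'(by simp [length_mstL, hk]) = (if P k then -1 else HV h k, SV s k, (k : Int)) := by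
  simp [mstL]

theorem mstL_congr (h s : List Int) (N : Nat) (P Q : Nat → Bool) (hPQ : ∀ k < N, P k = Q k) :
    mstL h s N P = mstL h s N Q := by
  unfold mstL
  apply List.map_congr_left
  intro k hk
  rw [List.mem_range] at hk
  rw [hPQ k hk]

theorem set_mstL (h s : List Int) (N : Nat) (P : Nat → Bool) (j : Nat) (hj : j < N) :
    (mstL h s N P).set j (-1, SV s j, (j : Int)) = mstL h s N (fun k => P k || k == j) := by
  apply List.ext_getElem
  · simp [length_mstL]
  · intro k hk hk2
    rw [length_mstL] at hk2
    rw [List.getElem_set, getElem_mstL h s N (fun k => P k || k == j) k hk2]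
    by_cases hkj : j = k
    · subst hkj; simp
    · rw [if_neg hkj, getElem_mstL h s N P k hk2]
      have hb : (k == j) = false := by simp; omega
      rw [hb, Bool.or_false]

theorem lex_asymm (a b : Int × Int × Int) (hab : LexLt a b) : ¬ LexLt b a := by
  unfold LexLt at *; omega


theorem ft_inj (h s : List Int) (k j : Nat) (hkj : FT h s k = FT h s j) : k = j := by
  unfold FT at hkj
  have := congrArg (fun p => p.2.2) hkj
  simp at this
  exact this

theorem scanL_iff (m : List (Int × Int × Int)) (c : Int) (hc : c < (m.length : Int)) :
    0 ≤ scanL m c ↔ ∃ k : Nat, (k : Int) ≤ c ∧ ∃ hk : k < m.length, (m[k]'hk).1 ≠ -1 := by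
  induction c using scanL.induct (m := m) with
  | case1 c hcond ih =>
    rw [scanL, if_pos hcond]
    obtain ⟨hc0, hval⟩ := hcond
    rw [ih (by omega)]
    constructor
    · rintro ⟨k, hk, hklen, hne⟩; exact ⟨k, by omega, hklen, hne⟩
    · rintro ⟨k, hk, hklen, hne⟩
      refine ⟨k, ?_, hklen, hne⟩
      rcases lt_or_eq_of_le hk with h | h
      · omega
      · exfalso
        apply hne
        rw [PySem.List.pyGetD_eq_getElem m (i := c) (0,0,0) hc0 hc] at hval
        have hck : c.toNat = k := by omega
        simp only [hck] at hval
        exact hval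
  | case2 c hcond =>
    rw [scanL, if_neg hcond]
    rw [Classical.not_and_iff_not_or_not] at hcond
    constructor
    · intro h0
      have hc0 : 0 ≤ c := h0
      have hval : (PySem.List.pyGetD m c (0,0,0)).1 ≠ -1 := by tauto
      rw [PySem.List.pyGetD_eq_getElem m (i := c) (0,0,0) hc0 hc] at hval
      exact ⟨c.toNat, by omega, by omega, hval⟩
    · rintro ⟨k, hk, _, _⟩; omega

theorem scanR_iff (m : List (Int × Int × Int)) (c : Int) (hc : 0 ≤ c) :
    scanR m c < (m.length : Int) ↔ ∃ k : Nat, c ≤ (k : Int) ∧ ∃ hk : k < m.length, (m[k]'hk).1 ≠ -1 := by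
  induction c using scanR.induct (m := m) with
  | case1 c hcond ih =>
    rw [scanR, if_pos hcond]
    obtain ⟨hclen, hval⟩ := hcond
    rw [ih (by omega)]
    constructor
    · rintro ⟨k, hk, hklen, hne⟩; exact ⟨k, by omega, hklen, hne⟩
    · rintro ⟨k, hk, hklen, hne⟩
      refine ⟨k, ?_, hklen, hne⟩
      rcases lt_or_eq_of_le hk with h | h
      · omega
      · exfalso
        apply hne
        rw [PySem.List.pyGetD_eq_getElem m (i := c) (0,0,0) hc hclen] at hval
        have hck : c.toNat = k := by omega
        simp only [hck] at hval
        exact hval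
  | case2 c hcond =>
    rw [scanR, if_neg hcond]
    rw [Classical.not_and_iff_not_or_not] at hcond
    constructor
    · intro hlt
      have hclen : c < (m.length : Int) := hlt
      have hval : (PySem.List.pyGetD m c (0,0,0)).1 ≠ -1 := by tauto
      rw [PySem.List.pyGetD_eq_getElem m (i := c) (0,0,0) hc hclen] at hval
      exact ⟨c.toNat, by omega, by omega, hval⟩
    · rintro ⟨k, hk, hklen, _⟩; omega

theorem insertBy_pairwise (x : Int × Int × Int) (ys : List (Int × Int × Int))
    (hys : ys.Pairwise LexLt) (hpos : ∀ y ∈ ys, y.2.2 < x.2.2) :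
    (PySem.List.insertBy (fun a b => decide (a.2.1 < b.2.1)) x ys).Pairwise LexLt := by
  induction ys with
  | nil => simp [PySem.List.insertBy]
  | cons y ys ih =>
    show (if decide (x.2.1 < y.2.1) then x :: y :: ys else y :: PySem.List.insertBy _ x ys).Pairwise LexLt
    rw [List.pairwise_cons] at hys
    obtain ⟨hy, hys'⟩ := hys
    by_cases hxy : x.2.1 < y.2.1
    · rw [if_pos (by simpa using hxy)]
      refine List.Pairwise.cons ?_ (List.Pairwise.cons hy hys')
      intro z hz
      rcases List.mem_cons.mp hz with h | h
      · subst h; exact Or.inl hxy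
      · have := hy z h
        unfold LexLt at *
        omega
    · rw [if_neg (by simpa using hxy)]
      refine List.Pairwise.cons ?_ (ih hys' (fun z hz => hpos z (List.mem_cons_of_mem y hz)))
      intro z hz
      rw [PySem.List.mem_insertBy] at hz
      rcases hz with h | h
      · subst h
        unfold LexLt
        have := hpos y (List.mem_cons_self)
        omega
      · exact hy z h

theorem foldl_insertBy_pairwise (xs acc : List (Int × Int × Int))
    (hacc : acc.Pairwise LexLt)
    (hcross : ∀ a ∈ acc, ∀ b ∈ xs, a.2.2 < b.2.2)
    (hxs : xs.Pairwise (fun a b => a.2.2 < b.2.2)) :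
    (xs.foldl (fun a x => PySem.List.insertBy (fun a b => decide (a.2.1 < b.2.1)) x a) acc).Pairwise LexLt := by
  induction xs generalizing acc with
  | nil => simpa using hacc
  | cons x xs ih =>
    rw [List.pairwise_cons] at hxs
    obtain ⟨hx, hxs'⟩ := hxs
    rw [List.foldl_cons]
    apply ih
    · exact insertBy_pairwise x acc hacc (fun a ha => hcross a ha x List.mem_cons_self)
    · intro a ha b hb
      rw [PySem.List.mem_insertBy] at ha
      rcases ha with h | h
      · subst h; exact hx b hb
      · exact hcross a h b (List.mem_cons_of_mem x hb)
    · exact hxs'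

theorem newm_pairwise (h s : List Int) (N : Nat) :
    (PySem.List.sorted ((List.range N).map (FT h s)) (fun x => x.2.1) false).Pairwise LexLt := by
  rw [PySem.List.sorted_eq_foldl_insertBy]
  apply foldl_insertBy_pairwise
  · exact List.Pairwise.nil
  · intro a ha; simp at ha
  · rw [List.pairwise_map]
    apply List.Pairwise.imp (R := (· < ·)) ?_ List.pairwise_lt_range
    intro a b hab
    unfold FT
    simpa using hab

theorem prefix_char (h s : List Int) (N : Nat) (pre tail : List (Int × Int × Int)) (e : Int × Int × Int)
    (hsplit : pre ++ e :: tail = PySem.List.sorted ((List.range N).map (FT h s)) (fun x => x.2.1) false) :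
    ∃ j, j < N ∧ e = FT h s j ∧
      ∀ k, k < N → ((FT h s k ∈ pre) ↔ (k ≠ j ∧ LexLt (FT h s k) (FT h s j))) := by
  have hperm : (pre ++ e :: tail).Perm ((List.range N).map (FT h s)) := by
    rw [hsplit]; exact PySem.List.sorted_perm _ _ _
  have hpair : (pre ++ e :: tail).Pairwise LexLt := by
    rw [hsplit]; exact newm_pairwise h s N
  have hnodupm0 : ((List.range N).map (FT h s)).Nodup := by
    apply List.Nodup.map_on
    · intro a ha b hb hab
      exact ft_inj h s a b hab
    · exact List.nodup_range
  have hnodup : (pre ++ e :: tail).Nodup := hperm.nodup_iff.mpr hnodupm0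
  have he : e ∈ (List.range N).map (FT h s) := hperm.mem_iff.mp (by simp)
  rw [List.mem_map] at he
  obtain ⟨j, hj, hef⟩ := he
  rw [List.mem_range] at hj
  refine ⟨j, hj, hef.symm, ?_⟩
  rw [List.pairwise_append] at hpair
  obtain ⟨hpre, htl, hcross⟩ := hpair
  rw [List.pairwise_cons] at htl
  obtain ⟨hetl, _⟩ := htl
  intro k hk
  constructor
  · intro hkpre
    have hlex : LexLt (FT h s k) e := hcross _ hkpre e (by simp)
    constructor
    · intro hkj
      subst hkj
      rw [← hef] at hlex
      exact lex_asymm _ _ hlex hlex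
    · rw [hef]; exact hlex
  · rintro ⟨hkj, hlex⟩
    have hkm : FT h s k ∈ pre ++ e :: tail := by
      apply hperm.mem_iff.mpr
      exact List.mem_map.mpr ⟨k, List.mem_range.mpr hk, rfl⟩
    rcases List.mem_append.mp hkm with hp | hp
    · exact hp
    · rcases List.mem_cons.mp hp with hp | hp
      · exact absurd (ft_inj h s k j (hp.trans hef.symm)) hkj
      · have := hetl _ hp
        rw [← hef] at this
        exact absurd hlex (lex_asymm _ _ this)

theorem stepA_mst (h s : List Int) (N : Nat) (P : Nat → Bool) (j : Nat) (hj : j < N) (t0 : Int) :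
    stepA (mstL h s N P, t0) (FT h s j)
      = (mstL h s N (fun k => P k || k == j),
         t0 + ((if ∃ k, k < j ∧ ¬((P k || k == j) = true) ∧ HV h k ≠ -1 then SV s j else 0) +
               (if ∃ k, k < N ∧ j < k ∧ ¬((P k || k == j) = true) ∧ HV h k ≠ -1 then SV s j else 0))) := by
  unfold stepA
  simp only [FT]
  have htn : ((j : Int)).toNat = j := by omega
  rw [htn, set_mstL h s N P j hj]
  set P' := fun k => P k || k == j with hP'
  have hlen : ((mstL h s N P').length : Int) = (N : Int) := by rw [length_mstL]
  -- left condition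
  have hL : (0 < (j:Int) ∧ 0 ≤ scanL (mstL h s N P') ((j:Int) - 1)) ↔
      (∃ k, k < j ∧ ¬(P' k = true) ∧ HV h k ≠ -1) := by
    constructor
    · rintro ⟨hj0, hscan⟩
      rw [scanL_iff _ _ (by omega)] at hscan
      obtain ⟨k, hk, hklen, hne⟩ := hscan
      rw [length_mstL] at hklen
      rw [getElem_mstL h s N P' k hklen] at hne
      simp only [] at hne
      by_cases hPk : P' k = true
      · rw [if_pos hPk] at hne; omega
      · rw [if_neg hPk] at hne
        exact ⟨k, by omega, hPk, hne⟩
    · rintro ⟨k, hk, hPk, hne⟩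
      refine ⟨by omega, ?_⟩
      rw [scanL_iff _ _ (by omega)]
      refine ⟨k, by omega, by rw [length_mstL]; omega, ?_⟩
      rw [getElem_mstL h s N P' k (by omega)]
      simp only [if_neg hPk]
      exact hne
  -- right condition
  have hR : ((j:Int) < ((mstL h s N P').length : Int) - 1 ∧ scanR (mstL h s N P') ((j:Int) + 1) < ((mstL h s N P').length : Int)) ↔
      (∃ k, k < N ∧ j < k ∧ ¬(P' k = true) ∧ HV h k ≠ -1) := by
    constructor
    · rintro ⟨hjN, hscan⟩
      rw [scanR_iff _ _ (by omega)] at hscan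
      obtain ⟨k, hk, hklen, hne⟩ := hscan
      rw [length_mstL] at hklen
      rw [getElem_mstL h s N P' k hklen] at hne
      simp only [] at hne
      by_cases hPk : P' k = true
      · rw [if_pos hPk] at hne; omega
      · rw [if_neg hPk] at hne
        exact ⟨k, hklen, by omega, hPk, hne⟩
    · rintro ⟨k, hk, hjk, hPk, hne⟩
      refine ⟨by rw [hlen]; omega, ?_⟩
      rw [scanR_iff _ _ (by omega)]
      refine ⟨k, by omega, by rw [length_mstL]; omega, ?_⟩
      rw [getElem_mstL h s N P' k (by omega)]
      simp only [if_neg hPk]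
      exact hne
  congr 1
  by_cases h1 : ∃ k, k < j ∧ ¬(P' k = true) ∧ HV h k ≠ -1
  · have hg : 0 < (j:Int) ∧ 0 ≤ scanL (mstL h s N P') ((j:Int) - 1) := hL.mpr h1
    rw [if_pos hg.1, if_pos hg.2, if_pos h1]
    by_cases h2 : ∃ k, k < N ∧ j < k ∧ ¬(P' k = true) ∧ HV h k ≠ -1
    · have hg2 := hR.mpr h2
      rw [if_pos hg2.1, if_pos hg2.2, if_pos h2]
      ring
    · rw [if_neg h2]
      rcases Classical.em ((j:Int) < ((mstL h s N P').length : Int) - 1) with hg2 | hg2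
      · rw [if_pos hg2]
        have : ¬ scanR (mstL h s N P') ((j:Int) + 1) < ((mstL h s N P').length : Int) := by
          intro hcon; exact h2 (hR.mp ⟨hg2, hcon⟩)
        rw [if_neg this]
        ring
      · rw [if_neg hg2]
        ring
  · have hg0 : ¬ (0 < (j:Int) ∧ 0 ≤ scanL (mstL h s N P') ((j:Int) - 1)) := fun hcon => h1 (hL.mp hcon)
    have hstep1 : (if 0 < (j:Int) then (if 0 ≤ scanL (mstL h s N P') ((j:Int) - 1) then t0 + SV s j else t0) else t0) = t0 := by
      by_cases hj0 : 0 < (j:Int)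
      · rw [if_pos hj0, if_neg (fun hcon => hg0 ⟨hj0, hcon⟩)]
      · rw [if_neg hj0]
    rw [hstep1, if_neg h1]
    by_cases h2 : ∃ k, k < N ∧ j < k ∧ ¬(P' k = true) ∧ HV h k ≠ -1
    · have hg2 := hR.mpr h2
      rw [if_pos hg2.1, if_pos hg2.2, if_pos h2]
      ring
    · rw [if_neg h2]
      rcases Classical.em ((j:Int) < ((mstL h s N P').length : Int) - 1) with hg2 | hg2
      · rw [if_pos hg2]
        have : ¬ scanR (mstL h s N P') ((j:Int) + 1) < ((mstL h s N P').length : Int) := by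
          intro hcon; exact h2 (hR.mp ⟨hg2, hcon⟩)
        rw [if_neg this]
        ring
      · rw [if_neg hg2]
        ring

def Aterm (h s : List Int) (N j : Nat) : Int :=
  (if ∃ k, k < j ∧ SV s j < SV s k ∧ HV h k ≠ -1 then SV s j else 0) +
  (if ∃ k, k < N ∧ j < k ∧ SV s j ≤ SV s k ∧ HV h k ≠ -1 then SV s j else 0)

theorem foldA (h s : List Int) (N : Nat) (tail : List (Int × Int × Int)) :
    ∀ (pre : List (Int × Int × Int)) (t0 : Int),
      pre ++ tail = PySem.List.sorted ((List.range N).map (FT h s)) (fun x => x.2.1) false →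
      (tail.foldl stepA (mstL h s N (fun k => decide (FT h s k ∈ pre)), t0)).2
        = t0 + (tail.map (fun e => Aterm h s N e.2.2.toNat)).sum := by
  induction tail with
  | nil => intro pre t0 _; simp
  | cons e tl ih =>
    intro pre t0 hsplit
    obtain ⟨j, hj, hef, hchar⟩ := prefix_char h s N pre tl e hsplit
    subst hef
    rw [List.foldl_cons, stepA_mst h s N (fun k => decide (FT h s k ∈ pre)) j hj t0]
    have hmeq : mstL h s N (fun k => (decide (FT h s k ∈ pre)) || k == j)
        = mstL h s N (fun k => decide (FT h s k ∈ pre ++ [FT h s j])) := by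
      apply mstL_congr
      intro k hk
      by_cases hkj : k = j
      · subst hkj; simp
      · have hne : ¬ (FT h s k = FT h s j) := fun hh => hkj (ft_inj h s k j hh)
        simp [List.mem_append, hkj, hne]
    rw [hmeq, ih (pre ++ [FT h s j]) _ (by rw [← hsplit]; simp)]
    have hcondL : (∃ k, k < j ∧ ¬((decide (FT h s k ∈ pre) || k == j) = true) ∧ HV h k ≠ -1)
        ↔ (∃ k, k < j ∧ SV s j < SV s k ∧ HV h k ≠ -1) := by
      constructor
      · rintro ⟨k, hk, hP, hne⟩
        rw [Bool.or_eq_true, not_or] at hP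
        obtain ⟨hP1, _⟩ := hP
        have hmem : ¬ (FT h s k ∈ pre) := by simpa using hP1
        rw [hchar k (by omega)] at hmem
        have hkj : k ≠ j := by omega
        have hnl : ¬ LexLt (FT h s k) (FT h s j) := by tauto
        unfold LexLt FT at hnl
        simp only [] at hnl
        refine ⟨k, hk, by omega, hne⟩
      · rintro ⟨k, hk, hsv, hne⟩
        refine ⟨k, hk, ?_, hne⟩
        rw [Bool.or_eq_true, not_or]
        constructor
        · simp only [decide_eq_true_eq]
          rw [hchar k (by omega)]
          rintro ⟨_, hlex⟩
          unfold LexLt FT at hlex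
          simp only [] at hlex
          omega
        · simp; omega
    have hcondR : (∃ k, k < N ∧ j < k ∧ ¬((decide (FT h s k ∈ pre) || k == j) = true) ∧ HV h k ≠ -1)
        ↔ (∃ k, k < N ∧ j < k ∧ SV s j ≤ SV s k ∧ HV h k ≠ -1) := by
      constructor
      · rintro ⟨k, hk, hjk, hP, hne⟩
        rw [Bool.or_eq_true, not_or] at hP
        obtain ⟨hP1, _⟩ := hP
        have hmem : ¬ (FT h s k ∈ pre) := by simpa using hP1
        rw [hchar k hk] at hmem
        have hkj : k ≠ j := by omega
        have hnl : ¬ LexLt (FT h s k) (FT h s j) := by tauto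
        unfold LexLt FT at hnl
        simp only [] at hnl
        refine ⟨k, hk, hjk, by omega, hne⟩
      · rintro ⟨k, hk, hjk, hsv, hne⟩
        refine ⟨k, hk, hjk, ?_, hne⟩
        rw [Bool.or_eq_true, not_or]
        constructor
        · simp only [decide_eq_true_eq]
          rw [hchar k hk]
          rintro ⟨_, hlex⟩
          unfold LexLt FT at hlex
          simp only [] at hlex
          omega
        · simp; omega
    simp only [hcondL, hcondR]
    simp only [List.map_cons, List.sum_cons]
    have hidx : (FT h s j).2.2.toNat = j := by simp [FT]
    rw [hidx]
    unfold Aterm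
    ring

theorem sum_map_range (f : Nat → Int) (N : Nat) :
    ((List.range N).map f).sum = ∑ j ∈ Finset.range N, f j := by
  induction N with
  | zero => simp
  | succ N ih => rw [List.range_succ, Finset.sum_range_succ]; simp [ih]

theorem solution_eq (h s : List Int) (n : Int) :
    solution h s n = h.sum + ∑ j ∈ Finset.range n.toNat, Aterm h s n.toNat j := by
  have hm0 : (PySem.List.pyRange 0 n 1).foldl
      (fun acc i => acc ++ [(PySem.List.pyGetD h i 0, PySem.List.pyGetD s i 0, i)]) []
      = (List.range n.toNat).map (FT h s) := by
    rw [PySem.List.foldl_append_singleton_eq_map, PySem.List.pyRange_one, List.map_map]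
    have hn0 : (n - 0).toNat = n.toNat := by omega
    rw [hn0]
    simp only [List.nil_append]
    apply List.map_congr_left
    intro k hk
    simp [FT, HV, SV]
  show ((PySem.List.sorted ((PySem.List.pyRange 0 n 1).foldl
      (fun acc i => acc ++ [(PySem.List.pyGetD h i 0, PySem.List.pyGetD s i 0, i)]) [])
      (fun x => x.2.1) false).foldl stepA
      ((PySem.List.pyRange 0 n 1).foldl
        (fun acc i => acc ++ [(PySem.List.pyGetD h i 0, PySem.List.pyGetD s i 0, i)]) [], h.sum)).2
    = h.sum + ∑ j ∈ Finset.range n.toNat, Aterm h s n.toNat j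
  rw [hm0]
  have hinit : mstL h s n.toNat (fun k => decide (FT h s k ∈ ([] : List (Int × Int × Int))))
      = (List.range n.toNat).map (FT h s) := by
    unfold mstL
    apply List.map_congr_left
    intro k hk
    simp [FT]
  have hfold := foldA h s n.toNat
      (PySem.List.sorted ((List.range n.toNat).map (FT h s)) (fun x => x.2.1) false) [] h.sum (by simp)
  rw [hinit] at hfold
  rw [hfold]
  congr 1
  have hperm := PySem.List.sorted_perm ((List.range n.toNat).map (FT h s)) (fun x : Int × Int × Int => x.2.1) false
  rw [List.Perm.sum_eq (List.Perm.map _ hperm)]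
  rw [List.map_map]
  rw [sum_map_range]
  apply Finset.sum_congr rfl
  intro j hj
  simp [FT]

def pm (v : Nat → Int) : Nat → Option Int
  | 0 => none
  | M + 1 => some (match pm v M with
      | none => v M
      | some b => if v M > b then v M else b)

theorem pm_le (v : Nat → Int) (M : Nat) (b : Int) (h : pm v M = some b) :
    (∀ i < M, v i ≤ b) ∧ ∃ i < M, v i = b := by
  induction M generalizing b with
  | zero => simp [pm] at h
  | succ M ih =>
    rw [pm] at h
    cases hM : pm v M with
    | none =>
      rw [hM] at h
      have hM0 : M = 0 := by
        cases M with
        | zero => rfl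
        | succ k => rw [pm] at hM; simp at hM
      subst hM0
      simp at h
      constructor
      · intro i hi; interval_cases i; omega
      · exact ⟨0, by omega, by omega⟩
    | some c =>
      rw [hM] at h
      obtain ⟨hle, i, hi, hv⟩ := ih c hM
      simp only [Option.some.injEq] at h
      by_cases hc : v M > c
      · rw [if_pos hc] at h
        refine ⟨?_, M, by omega, by omega⟩
        intro j hj
        rcases Nat.lt_succ_iff_lt_or_eq.mp hj with hj | hj
        · have := hle j hj; omega
        · subst hj; omega
      · rw [if_neg hc] at h
        refine ⟨?_, i, by omega, by omega⟩
        intro j hj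
        rcases Nat.lt_succ_iff_lt_or_eq.mp hj with hj | hj
        · have := hle j hj; omega
        · subst hj; omega

theorem pm_none (v : Nat → Int) (M : Nat) (h : pm v M = none) : M = 0 := by
  cases M with
  | zero => rfl
  | succ k => rw [pm] at h; simp at h

-- sum over a List.range as a Finset sum

theorem bloopL (v : Nat → Int) (M : Nat) (t0 : Int) :
    (List.range M).foldl (fun (st : Int × Option Int) k =>
      (match st.2 with | some b => if b > v k then st.1 + v k else st.1 | none => st.1,
       match st.2 with | none => some (v k) | some b => if v k > b then some (v k) else some b))
      (t0, none)
    = (t0 + ∑ j ∈ Finset.range M, (if ∃ i, i < j ∧ v j < v i then v j else 0), pm v M) := by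
  induction M with
  | zero => simp [pm]
  | succ M ih =>
    rw [List.range_succ, List.foldl_append, ih, Finset.sum_range_succ]
    simp only [List.foldl_cons, List.foldl_nil]
    cases hM : pm v M with
    | none =>
      have h0 : M = 0 := pm_none v M hM
      subst h0
      simp [pm]
    | some b =>
      obtain ⟨hle, i, hi, hv⟩ := pm_le v M b hM
      simp only []
      have hcond : (b > v M) = (∃ i, i < M ∧ v M < v i) := by
        apply propext
        constructor
        · intro hb; exact ⟨i, hi, by omega⟩
        · rintro ⟨j, hj, hvj⟩; have := hle j hj; omega
      rw [Prod.mk.injEq]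
      constructor
      · by_cases hb : b > v M
        · rw [if_pos hb, if_pos (by rw [← hcond]; exact hb)]; ring
        · rw [if_neg hb, if_neg (by rw [← hcond]; exact hb)]; ring
      · rw [pm, hM]
        by_cases hb : v M > b
        · rw [if_pos hb]; simp [hb]
        · rw [if_neg hb]; simp [hb]

theorem bloopR (v : Nat → Int) (M : Nat) (t0 : Int) :
    (List.range M).foldl (fun (st : Int × Option Int) k =>
      (match st.2 with | some b => if b ≥ v k then st.1 + v k else st.1 | none => st.1,
       match st.2 with | none => some (v k) | some b => if v k > b then some (v k) else some b))
      (t0, none)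
    = (t0 + ∑ j ∈ Finset.range M, (if ∃ i, i < j ∧ v j ≤ v i then v j else 0), pm v M) := by
  induction M with
  | zero => simp [pm]
  | succ M ih =>
    rw [List.range_succ, List.foldl_append, ih, Finset.sum_range_succ]
    simp only [List.foldl_cons, List.foldl_nil]
    cases hM : pm v M with
    | none =>
      have h0 : M = 0 := pm_none v M hM
      subst h0
      simp [pm]
    | some b =>
      obtain ⟨hle, i, hi, hv⟩ := pm_le v M b hM
      simp only []
      have hcond : (b ≥ v M) = (∃ i, i < M ∧ v M ≤ v i) := by
        apply propext
        constructor
        · intro hb; exact ⟨i, hi, by omega⟩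
        · rintro ⟨j, hj, hvj⟩; have := hle j hj; omega
      rw [Prod.mk.injEq]
      constructor
      · by_cases hb : b ≥ v M
        · rw [if_pos hb, if_pos (by rw [← hcond]; exact hb)]; ring
        · rw [if_neg hb, if_neg (by rw [← hcond]; exact hb)]; ring
      · rw [pm, hM]
        by_cases hb : v M > b
        · rw [if_pos hb]; simp [hb]
        · rw [if_neg hb]; simp [hb]

def Cval (h s : List Int) (N : Nat) : Int :=
  h.sum + ∑ j ∈ Finset.range N,
    ((if ∃ k, k < j ∧ SV s j < SV s k then SV s j else 0) +
     (if ∃ k, k < N ∧ j < k ∧ SV s j ≤ SV s k then SV s j else 0))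

theorem alt_eq (h s : List Int) (n : Int) : solution_alt h s n = Cval h s n.toNat := by
  rcases le_or_gt n 0 with hn | hn
  · have h1 : PySem.List.pyRange 0 n 1 = [] := PySem.List.pyRange_one_eq_nil (by omega)
    have h2 : PySem.List.pyRange (n-1) (-1) (-1) = [] := PySem.List.pyRange_neg_one_eq_nil (by omega)
    have hN : n.toNat = 0 := by omega
    simp [solution_alt, Cval, h1, h2, hN]
  · simp only [solution_alt]
    rw [PySem.List.pyRange_one, PySem.List.pyRange_neg_one]
    rw [List.foldl_map, List.foldl_map]
    simp only [zero_add, PySem.List.pyGetD_natCast]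
    have hN : ((n.toNat : Int)) = n := by omega
    have hsub : (n - 0).toNat = n.toNat := by omega
    have hsub2 : (n - 1 - -1).toNat = n.toNat := by omega
    rw [hsub, hsub2]
    rw [bloopL (v := fun k => s.getD k 0)]
    simp only []
    have hc := PySem.List.foldl_congr_mem
      (l := List.range n.toNat)
      (f := fun (x : Int × Option Int) (y : Nat) =>
        (match x.2 with
          | some b => if b ≥ PySem.List.pyGetD s (n - 1 - (y : Int)) 0 then x.1 + PySem.List.pyGetD s (n - 1 - (y : Int)) 0 else x.1
          | none => x.1,
         match x.2 with
          | none => some (PySem.List.pyGetD s (n - 1 - (y : Int)) 0)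
          | some b => if PySem.List.pyGetD s (n - 1 - (y : Int)) 0 > b then some (PySem.List.pyGetD s (n - 1 - (y : Int)) 0) else some b))
      (g := fun (st : Int × Option Int) (y : Nat) =>
        (match st.2 with
          | some b => if b ≥ s.getD (n.toNat - 1 - y) 0 then st.1 + s.getD (n.toNat - 1 - y) 0 else st.1
          | none => st.1,
         match st.2 with
          | none => some (s.getD (n.toNat - 1 - y) 0)
          | some b => if s.getD (n.toNat - 1 - y) 0 > b then some (s.getD (n.toNat - 1 - y) 0) else some b))
      (init := (h.sum + ∑ j ∈ Finset.range n.toNat, if ∃ i < j, s.getD j 0 < s.getD i 0 then s.getD j 0 else 0, none))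
      (by
        intro acc y hy
        rw [List.mem_range] at hy
        have he : n - 1 - (y : Int) = ((n.toNat - 1 - y : Nat) : Int) := by omega
        simp only [he, PySem.List.pyGetD_natCast])
    rw [hc]
    rw [bloopR (v := fun y => s.getD (n.toNat - 1 - y) 0)]
    simp only [Cval, SV]
    have hsum : (∑ j ∈ Finset.range n.toNat,
        if ∃ i < j, s.getD (n.toNat - 1 - j) 0 ≤ s.getD (n.toNat - 1 - i) 0 then s.getD (n.toNat - 1 - j) 0 else 0)
      = ∑ j ∈ Finset.range n.toNat,
        if ∃ k, k < n.toNat ∧ j < k ∧ s.getD j 0 ≤ s.getD k 0 then s.getD j 0 else 0 := by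
      rw [← Finset.sum_range_reflect (fun j => if ∃ k, k < n.toNat ∧ j < k ∧ s.getD j 0 ≤ s.getD k 0 then s.getD j 0 else 0) n.toNat]
      apply Finset.sum_congr rfl
      intro j hj
      rw [Finset.mem_range] at hj
      congr 1
      apply propext
      constructor
      · rintro ⟨i, hi, hle⟩
        exact ⟨n.toNat - 1 - i, by omega, by omega, hle⟩
      · rintro ⟨k, hk, hjk, hle⟩
        refine ⟨n.toNat - 1 - k, by omega, ?_⟩
        have he2 : n.toNat - 1 - (n.toNat - 1 - k) = k := by omega
        rw [he2]
        exact hle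
    rw [hsum, Finset.sum_add_distrib]
    ring


theorem final_eq (h_ : List Int) (s : List Int) (n : Int) (hpre : Pre_solution h_ s n) :
    solution h_ s n = solution_alt h_ s n := by
  obtain ⟨_, _, hno⟩ := hpre
  rw [solution_eq, alt_eq]
  unfold Cval
  congr 1
  apply Finset.sum_congr rfl
  intro j hj
  rw [Finset.mem_range] at hj
  unfold Aterm
  have hL : (∃ k, k < j ∧ SV s j < SV s k ∧ HV h_ k ≠ -1) ↔ (∃ k, k < j ∧ SV s j < SV s k) := by
    constructor
    · rintro ⟨k, hk, hsv, _⟩; exact ⟨k, hk, hsv⟩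
    · rintro ⟨k, hk, hsv⟩; exact ⟨k, hk, hsv, hno k (by omega)⟩
  have hR : (∃ k, k < n.toNat ∧ j < k ∧ SV s j ≤ SV s k ∧ HV h_ k ≠ -1) ↔
      (∃ k, k < n.toNat ∧ j < k ∧ SV s j ≤ SV s k) := by
    constructor
    · rintro ⟨k, hk, hjk, hsv, _⟩; exact ⟨k, hk, hjk, hsv⟩
    · rintro ⟨k, hk, hjk, hsv⟩; exact ⟨k, hk, hjk, hsv, hno k hk⟩
  simp only [hL, hR]

-- ===== VERDICT (by name: the statement is the Claim_ definition above) =====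
theorem solution_spec : Claim_equal_solution := by
  intro h_ s n _ hpre
  unfold Spec_solution
  exact final_eq h_ s n hpre
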